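-- pv_equiv track=rewrite | github.com/arecker/blog | src/utils/__init__.py | paginate_list
-- ===== SOURCE A (Python) =====
-- import collections
--
-- Pagination = collections.namedtuple('Pagination', ['next', 'previous'])
--
-- def paginate_list(things: list = []):
--     """Returns a pagination map for a list of things.
--
--     >>> pages = paginate_list(['a', 'b', 'c'])
--     >>> pages['a'].previous is None
--     True
--     >>> pages['a'].next
--     'b'
--     >>> pages['c'].previous
--     'b'
--     >>> pages['c'].next is None
--     True
--     """
--
--     pagination = {}
--
--     for i, thing in enumerate(things):
--         if i > 0:
--             previous_thing = things[i - 1]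
--         else:
--             previous_thing = None
--
--         try:
--             next_thing = things[i + 1]
--         except IndexError:
--             next_thing = None
--
--         pagination[thing] = Pagination(next_thing, previous_thing)
--
--     return pagination
-- ===== SOURCE B (Python) =====
-- import collections
--
-- Pagination = collections.namedtuple('Pagination', ['next', 'previous'])
--
--
-- def paginate_list(things: list = []):
--     """Returns a pagination map for a list of things.
--
--     Builds the shifted neighbor lists first, then combines them in one
--     dict comprehension.
--     """
--     prevs = [None] + list(things[:-1])
--     nexts = list(things[1:]) + [None]
--     return {t: Pagination(n, p) for t, n, p in zip(things, nexts, prevs)}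
-- ===== Notes on version B (the rewrite author's own statement) =====
-- stated objective: simpler
-- what changed: Replaces the enumerate loop with per-index arithmetic and try/except IndexError by building the two shifted neighbor lists via slicing ([None]+things[:-1] and things[1:]+[None]) and combining them with the original list in a single zipped dict comprehension.
import Mathlib
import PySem

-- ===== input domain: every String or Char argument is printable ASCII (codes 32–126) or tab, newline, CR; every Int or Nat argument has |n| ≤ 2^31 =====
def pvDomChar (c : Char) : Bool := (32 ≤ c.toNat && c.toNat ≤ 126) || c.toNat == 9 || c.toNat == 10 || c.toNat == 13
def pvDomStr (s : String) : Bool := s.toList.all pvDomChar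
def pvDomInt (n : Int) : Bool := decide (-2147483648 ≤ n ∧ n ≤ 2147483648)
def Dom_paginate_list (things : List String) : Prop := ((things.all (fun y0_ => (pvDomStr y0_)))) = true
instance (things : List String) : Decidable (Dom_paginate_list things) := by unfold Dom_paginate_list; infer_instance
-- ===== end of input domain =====

-- B replaces A's index-arithmetic loop (with try/except IndexError) by two shifted slice lists
-- combined in a single zipped dict comprehension (objective: simpler).

-- ===== PORT A =====
-- A: for i, thing in enumerate(things): prev = things[i-1] if i > 0 else None;
--    next = things[i+1] (IndexError -> None); pagination[thing] = Pagination(next, prev)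
def paginate_list (things : List String) : List (String × Option String × Option String) :=
  ((PySem.List.enumerate things).foldl
    (fun (d : PySem.Dict String (Option String × Option String)) (p : Int × String) =>
      d.insert p.2
        (PySem.List.pyGet? things (p.1 + 1),
         if p.1 > 0 then PySem.List.pyGet? things (p.1 - 1) else none))
    PySem.Dict.empty).items

-- ===== PORT B =====
-- B: prevs = [None] + list(things[:-1]); nexts = list(things[1:]) + [None];
--    {t: Pagination(n, p) for t, n, p in zip(things, nexts, prevs)}
def paginate_list_alt (things : List String) : List (String × Option String × Option String) :=
  let prevs : List (Option String) :=
    none :: (PySem.List.slice things none (some (-1))).map some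
  let nexts : List (Option String) :=
    (PySem.List.slice things (some 1) none).map some ++ [none]
  ((things.zip (nexts.zip prevs)).foldl
    (fun (d : PySem.Dict String (Option String × Option String)) x =>
      d.insert x.1 x.2)
    PySem.Dict.empty).items

-- ===== PRECONDITION & SPEC =====
def Spec_paginate_list (things : List String) (out : List (String × Option String × Option String)) : Prop := out = paginate_list_alt things
instance (things : List String) (out : List (String × Option String × Option String)) : Decidable (Spec_paginate_list things out) := by unfold Spec_paginate_list; infer_instance

-- ===== CLAIM (what is proved, stated in full; the proofs are below) =====
def Claim_equal_paginate_list : Prop := ∀ (things : List String), Dom_paginate_list things → Spec_paginate_list things (paginate_list things)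

-- ===== LEMMAS AND PROOFS =====

lemma enum_getElem? {α : Type} (xs : List α) (s : Int) (i : Nat) :
    (PySem.List.enumerate xs s)[i]? = xs[i]?.map (fun x => (s + i, x)) := by
  induction xs generalizing s i with
  | nil => simp [PySem.List.enumerate_nil]
  | cons a t ih =>
    rw [PySem.List.enumerate_cons]
    cases i with
    | zero => simp
    | succ j =>
      simp only [List.getElem?_cons_succ, ih]
      have : s + 1 + (j : Int) = s + (↑j + 1) := by ring
      simp [this]

lemma enum_length {α : Type} (xs : List α) (s : Int) :
    (PySem.List.enumerate xs s).length = xs.length := PySem.List.length_enumerate ..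

lemma enum_getElem {α : Type} (xs : List α) (s : Int) (i : Nat) (h : i < xs.length)
    (h' : i < (PySem.List.enumerate xs s).length) :
    (PySem.List.enumerate xs s)[i] = (s + i, xs[i]) := by
  have := enum_getElem? xs s i
  rw [List.getElem?_eq_getElem h, List.getElem?_eq_getElem h'] at this
  simpa using this

-- The key/value pairs produced by A's enumerate loop coincide with B's zipped shifted lists.
lemma pairs_eq (things : List String) :
    (PySem.List.enumerate things).map
      (fun p : Int × String =>
        (p.2, (PySem.List.pyGet? things (p.1 + 1),
               if p.1 > 0 then PySem.List.pyGet? things (p.1 - 1) else none))) =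
    things.zip ((((things.drop 1).map some ++ [none]).zip
      (none :: things.dropLast.map some))) := by
  have hlen : things.length - 1 + 1 = things.length ∨ things.length = 0 := by omega
  apply List.ext_getElem
  · simp
    omega
  · intro i h1 h2
    have hi : i < things.length := by simpa [enum_length] using h1
    rw [List.getElem_map, enum_getElem things 0 i hi (by simpa [enum_length] using hi),
        List.getElem_zip, List.getElem_zip]
    simp only [zero_add]
    refine Prod.ext (by simp) (Prod.ext ?_ ?_)
    · -- next component
      show PySem.List.pyGet? things ((i : Int) + 1) = ((things.drop 1).map some ++ [none])[i]'(by simp; omega)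
      have hc : ((i : Int) + 1) = ((i + 1 : Nat) : Int) := by push_cast; ring
      rw [hc, PySem.List.pyGet?_natCast]
      by_cases hlast : i + 1 < things.length
      · rw [List.getElem?_eq_getElem hlast,
            List.getElem_append_left (by simp; omega)]
        simp
      · have : i = things.length - 1 := by omega
        rw [List.getElem?_eq_none (by omega),
            List.getElem_append_right (by simp; omega)]
        simp
    · -- previous component
      show (if (i : Int) > 0 then PySem.List.pyGet? things ((i : Int) - 1) else none)
            = (none :: things.dropLast.map some)[i]'(by simp; omega)
      cases i with
      | zero => simp
      | succ j =>
        have hpos : ((j + 1 : Nat) : Int) > 0 := by positivity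
        rw [if_pos hpos]
        have hc : (((j + 1 : Nat) : Int) - 1) = ((j : Nat) : Int) := by push_cast; ring
        rw [hc, PySem.List.pyGet?_natCast,
            List.getElem?_eq_getElem (by omega : j < things.length)]
        simp [List.getElem_dropLast]

lemma ports_eq (things : List String) : paginate_list things = paginate_list_alt things := by
  show ((PySem.List.enumerate things).foldl
    (fun (d : PySem.Dict String (Option String × Option String)) (p : Int × String) =>
      d.insert p.2
        (PySem.List.pyGet? things (p.1 + 1),
         if p.1 > 0 then PySem.List.pyGet? things (p.1 - 1) else none))
    PySem.Dict.empty).items =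
    ((things.zip ((((PySem.List.slice things (some 1) none).map some ++ [none]).zip
      (none :: (PySem.List.slice things none (some (-1))).map some)))).foldl
    (fun (d : PySem.Dict String (Option String × Option String)) x =>
      d.insert x.1 x.2)
    PySem.Dict.empty).items
  simp only [PySem.List.slice_to_neg_one, PySem.List.slice_from, zero_le_one, Int.toNat_one]
  rw [← pairs_eq things, List.foldl_map]

-- ===== VERDICT (by name: the statement is the Claim_ definition above) =====
theorem paginate_list_spec : Claim_equal_paginate_list := by
  intro things _
  unfold Spec_paginate_list
  exact ports_eq things
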